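-- pv_equiv track=rewrite | github.com/siklone/RegProbe | scripts/update_readme_progress.py | count_headings
-- ===== SOURCE A (Python) =====
-- def count_headings(text):
--     count = 0
--     in_fence = False
--     for line in text.splitlines():
--         stripped = line.lstrip()
--         if stripped.startswith("```") or stripped.startswith("~~~"):
--             in_fence = not in_fence
--             continue
--         if in_fence:
--             continue
--         if line.startswith("# "):
--             count += 1
--     return count
-- ===== SOURCE B (Python) =====
-- def count_headings(text):
--     # Partition lines into segments delimited by fence-marker lines;
--     # even-indexed segments are outside fences.
--     segments = []
--     cur = []
--     for line in text.splitlines():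
--         s = line.lstrip()
--         if s.startswith("```") or s.startswith("~~~"):
--             segments.append(cur)
--             cur = []
--         else:
--             cur.append(line)
--     segments.append(cur)
--     return sum(
--         sum(1 for line in seg if line.startswith("# "))
--         for i, seg in enumerate(segments) if i % 2 == 0
--     )
-- ===== Notes on version B (the rewrite author's own statement) =====
-- stated objective: alternative
-- what changed: Replaces the stateful in_fence flag loop by a two-phase pass: split the lines into segments delimited by fence-marker lines, then count heading lines only in even-indexed (outside-fence) segments.
import Mathlib
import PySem

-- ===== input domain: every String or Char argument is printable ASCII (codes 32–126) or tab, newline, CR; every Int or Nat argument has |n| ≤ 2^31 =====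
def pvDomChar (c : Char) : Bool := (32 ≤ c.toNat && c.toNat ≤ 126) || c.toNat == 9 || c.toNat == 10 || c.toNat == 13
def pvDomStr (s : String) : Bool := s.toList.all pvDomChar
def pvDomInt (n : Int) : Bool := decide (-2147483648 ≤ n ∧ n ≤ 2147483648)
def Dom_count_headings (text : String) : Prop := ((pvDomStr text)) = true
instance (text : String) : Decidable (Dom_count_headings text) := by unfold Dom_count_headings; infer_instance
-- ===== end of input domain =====

-- B restructures A's single stateful in_fence loop into a two-phase pass (split into
-- fence-delimited segments, then count '# ' lines in even-indexed segments); same cost.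

-- ===== PORT A =====
-- one loop iteration of A: state (count, in_fence)
def pvAStep (st : Int × Bool) (line : String) : Int × Bool :=
  let stripped := PySem.Str.lstrip line
  if PySem.Str.startswith stripped "```" || PySem.Str.startswith stripped "~~~" then
    (st.1, !st.2)
  else if st.2 then st
  else if PySem.Str.startswith line "# " then (st.1 + 1, st.2)
  else st

def count_headings (text : String) : Int :=
  ((PySem.Str.splitlines text).foldl pvAStep (0, false)).1

-- ===== PORT B =====
def pvIsMarker (line : String) : Bool :=
  PySem.Str.startswith (PySem.Str.lstrip line) "```" ||
  PySem.Str.startswith (PySem.Str.lstrip line) "~~~"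

-- split the line list into segments delimited by marker lines (markers are dropped)
def pvSegments : List String → List (List String)
  | [] => [[]]
  | l :: ls =>
    if pvIsMarker l then [] :: pvSegments ls
    else
      match pvSegments ls with
      | seg :: segs => (l :: seg) :: segs
      | [] => [[l]]

-- count '# ' lines in the even-indexed segments (outside := parity flag)
def pvCountSegs : Bool → List (List String) → Int
  | _, [] => 0
  | true, seg :: segs =>
      (seg.countP (fun line => PySem.Str.startswith line "# ") : Int) + pvCountSegs false segs
  | false, _ :: segs => pvCountSegs true segs

def count_headings_alt (text : String) : Int :=
  pvCountSegs true (pvSegments (PySem.Str.splitlines text))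

-- ===== PRECONDITION & SPEC =====
def Spec_count_headings (text : String) (out : Int) : Prop := out = count_headings_alt text
instance (text : String) (out : Int) : Decidable (Spec_count_headings text out) := by unfold Spec_count_headings; infer_instance

-- ===== CLAIM (what is proved, stated in full; the proofs are below) =====
def Claim_equal_count_headings : Prop := ∀ (text : String), Dom_count_headings text → Spec_count_headings text (count_headings text)

-- ===== LEMMAS AND PROOFS =====
theorem pvSegments_ne_nil (ls : List String) : pvSegments ls ≠ [] := by
  cases ls with
  | nil => simp [pvSegments]
  | cons l ls =>
    simp only [pvSegments]
    split
    · simp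
    · rcases h : pvSegments ls with _ | ⟨seg, segs⟩ <;> simp

theorem pvMain (ls : List String) : ∀ (c : Int) (f : Bool),
    (ls.foldl pvAStep (c, f)).1 = c + pvCountSegs (!f) (pvSegments ls) := by
  induction ls with
  | nil =>
    intro c f
    cases f <;> simp [pvSegments, pvCountSegs]
  | cons l ls ih =>
    intro c f
    by_cases hm : pvIsMarker l
    · have hstep : pvAStep (c, f) l = (c, !f) := by
        simp [pvIsMarker] at hm
        simp only [pvAStep]
        rcases hm with h1 | h1 <;> simp [h1]
      rw [List.foldl_cons, hstep, ih]
      simp only [pvSegments, hm, if_pos]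
      cases f <;> simp [pvCountSegs]
    · simp [pvIsMarker, not_or] at hm
      have hseg : pvSegments (l :: ls) =
          match pvSegments ls with
          | seg :: segs => (l :: seg) :: segs
          | [] => [[l]] := by
        simp [pvSegments, pvIsMarker, hm.1, hm.2]
      rcases h : pvSegments ls with _ | ⟨seg, segs⟩
      · exact absurd h (pvSegments_ne_nil ls)
      · rw [h] at hseg
        cases f with
        | true =>
          have hstep : pvAStep (c, true) l = (c, true) := by
            simp [pvAStep, hm.1, hm.2]
          rw [List.foldl_cons, hstep, ih, hseg, h]
          simp [pvCountSegs]
        | false =>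
          have hstep : pvAStep (c, false) l =
              (if PySem.Chars.startswith l.toList ['#', ' '] then c + 1 else c, false) := by
            simp only [pvAStep]
            simp [hm.1, hm.2]
            split <;> simp
          rw [List.foldl_cons, hstep]
          by_cases hh : PySem.Chars.startswith l.toList ['#', ' ']
          · rw [if_pos hh, ih, hseg, h]
            simp [pvCountSegs, hh]
            ring
          · rw [if_neg hh, ih, hseg, h]
            simp only [Bool.not_eq_true] at hh
            simp [pvCountSegs, hh]

-- ===== VERDICT (by name: the statement is the Claim_ definition above) =====
theorem count_headings_spec : Claim_equal_count_headings := by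
  intro text _
  unfold Spec_count_headings count_headings count_headings_alt
  simpa using pvMain (PySem.Str.splitlines text) 0 false
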